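-- pv_equiv track=rewrite | github.com/maharshi95/acf-data | utils/qb_tokenization.py | get_spans_from_sents
-- ===== SOURCE A (Python) =====
-- from typing import Iterable, Mapping, Optional, Sequence
--
-- def get_spans_from_sents(text: str, sents: Iterable[str]):
--     spans = []
--     curr_start = 0
--     for sent_i, sent in enumerate(sents):
--         sent = sent.strip()
--         if not sent:
--             continue
--         i = text.find(sent, curr_start)
--         if i == -1:
--             raise RuntimeError(
--                 f"Sentence not found. \nSentence: {sent}\nText: {text[curr_start:]}"
--             )
--         if sent.startswith("/"):
--             # Merge the spans i and i+1 if span[i+1] starts with "/"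
--             spans[-1][1] = i + len(sent)
--         elif sent_i > 0 and sent[0].isupper() and sents[sent_i - 1].endswith(" v."):
--             # Merge the spans i and i+1 if the previous sentence ends with " v."
--             # This is a hack to deal with bad tokenizations of the form Moriarty v. Holmes
--             spans[-1][1] = i + len(sent)
--         else:
--             spans.append([i, i + len(sent)])
--         curr_start = i + len(sent)
--     return spans
-- ===== SOURCE B (Python) =====
-- def get_spans_from_sents(text: str, sents):
--     sents = list(sents)
--     # Pass 1: locate each non-empty stripped sentence and tag it with a merge flag.
--     recs = []
--     curr = 0
--     for k, raw in enumerate(sents):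
--         s = raw.strip()
--         if not s:
--             continue
--         i = text.find(s, curr)
--         if i == -1:
--             raise RuntimeError(
--                 f"Sentence not found. \nSentence: {s}\nText: {text[curr:]}"
--             )
--         end = i + len(s)
--         merge = s.startswith("/") or (
--             k > 0 and s[0].isupper() and sents[k - 1].endswith(" v.")
--         )
--         recs.append((i, end, merge))
--         curr = end
--     # Pass 2: each maximal run "head record + following merge records" is one span.
--     spans = []
--     idx = 0
--     while idx < len(recs):
--         start, end = recs[idx][0], recs[idx][1]
--         idx += 1
--         while idx < len(recs) and recs[idx][2]:
--             end = recs[idx][1]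
--             idx += 1
--         spans.append([start, end])
--     return spans
-- ===== Notes on version B (the rewrite author's own statement) =====
-- stated objective: alternative
-- what changed: B splits A's single loop with in-place spans[-1] mutation into two phases: first locate every non-empty sentence and tag it with a merge flag, then turn each maximal run of a head record followed by merge records into one span.
import Mathlib
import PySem

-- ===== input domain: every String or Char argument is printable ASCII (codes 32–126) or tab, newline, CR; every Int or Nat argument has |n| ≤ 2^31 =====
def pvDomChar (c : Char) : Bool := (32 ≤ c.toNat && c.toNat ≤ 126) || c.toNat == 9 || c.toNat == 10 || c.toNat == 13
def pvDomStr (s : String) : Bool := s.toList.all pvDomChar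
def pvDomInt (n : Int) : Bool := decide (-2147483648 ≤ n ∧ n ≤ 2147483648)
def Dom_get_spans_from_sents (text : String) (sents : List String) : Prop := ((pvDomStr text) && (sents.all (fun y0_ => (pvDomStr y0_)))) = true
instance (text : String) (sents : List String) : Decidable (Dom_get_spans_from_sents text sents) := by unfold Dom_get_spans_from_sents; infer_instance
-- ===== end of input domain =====

-- B replaces A's single pass with in-place last-span mutation by two phases: locate all
-- sentences with merge flags, then turn each maximal "head + merge records" run into one span
-- (objective: alternative decomposition, same cost; return value only — neither mutates input).

-- ===== PORT A =====
-- s[0].isupper() for a non-empty stripped sentence (exact on the ASCII domain)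
def pvHeadUpper (s : String) : Bool :=
  match s.toList with
  | c :: _ => PySem.Chars.isupper c
  | [] => false

-- spans[-1][1] = e  (A only reaches this with spans nonempty; on [] Python raises IndexError)
def pvSetLastEnd (spans : List (List Int)) (e : Int) : List (List Int) :=
  match spans.getLast? with
  | some sp => spans.dropLast ++ [PySem.List.pySetD sp 1 e]
  | none => spans

-- the for-loop of A over enumerate(sents): state = (spans, curr_start)
def pvA_go (text : String) (sents : List String) : List (Int × String) → List (List Int) → Int → List (List Int)
  | [], spans, _ => spans
  | (k, raw) :: rest, spans, curr =>
    let s := PySem.Str.strip raw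
    if s = "" then pvA_go text sents rest spans curr
    else
      let i := PySem.Str.findFrom text s curr none
      if i = -1 then spans   -- Python raises RuntimeError here; outside Pre_
      else
        let e := i + PySem.Str.len s
        if PySem.Str.startswith s "/" then
          pvA_go text sents rest (pvSetLastEnd spans e) e
        else if decide (k > 0) && pvHeadUpper s && PySem.Str.endswith (PySem.List.pyGetD sents (k - 1) "") " v." then
          pvA_go text sents rest (pvSetLastEnd spans e) e
        else
          pvA_go text sents rest (spans ++ [[i, e]]) e

def get_spans_from_sents (text : String) (sents : List String) : List (List Int) :=
  pvA_go text sents (PySem.List.enumerate sents) [] 0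

-- ===== PORT B =====
-- pass 1: records (start, end, merge flag) for each non-empty stripped sentence
def pvB_pass1 (text : String) (sents : List String) : List (Int × String) → Int → List (Int × Int × Bool) → List (Int × Int × Bool)
  | [], _, acc => acc
  | (k, raw) :: rest, curr, acc =>
    let s := PySem.Str.strip raw
    if s = "" then pvB_pass1 text sents rest curr acc
    else
      let i := PySem.Str.findFrom text s curr none
      if i = -1 then acc   -- Python raises RuntimeError here; outside Pre_
      else
        let e := i + PySem.Str.len s
        let m := PySem.Str.startswith s "/" ||
                 (decide (k > 0) && pvHeadUpper s && PySem.Str.endswith (PySem.List.pyGetD sents (k - 1) "") " v.")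
        pvB_pass1 text sents rest e (acc ++ [(i, e, m)])

-- pass 2: the inner while-loop — consume following merge records, extending the current end
def pvB_run (s e : Int) : List (Int × Int × Bool) → List (List Int)
  | [] => [[s, e]]
  | (i2, e2, m) :: rest => if m then pvB_run s e2 rest else [s, e] :: pvB_run i2 e2 rest

-- pass 2: the outer while-loop
def pvB_pass2 : List (Int × Int × Bool) → List (List Int)
  | [] => []
  | (i, e, _) :: rest => pvB_run i e rest

def get_spans_from_sents_alt (text : String) (sents : List String) : List (List Int) :=
  pvB_pass2 (pvB_pass1 text sents (PySem.List.enumerate sents) 0 [])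

-- ===== PRECONDITION & SPEC =====
-- every stripped non-empty sentence is found in text from the running offset (else A raises RuntimeError)
def pvAllFind (text : String) (sents : List String) : List (Int × String) → Int → Bool
  | [], _ => true
  | (_, raw) :: rest, curr =>
    let s := PySem.Str.strip raw
    if s = "" then pvAllFind text sents rest curr
    else
      let i := PySem.Str.findFrom text s curr none
      if i = -1 then false else pvAllFind text sents rest (i + PySem.Str.len s)

-- the merge flag of the FIRST located sentence (false if there is none or a find fails first)
def pvFirstMerge (text : String) (sents : List String) : List (Int × String) → Int → Bool
  | [], _ => false
  | (k, raw) :: rest, curr =>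
    let s := PySem.Str.strip raw
    if s = "" then pvFirstMerge text sents rest curr
    else
      let i := PySem.Str.findFrom text s curr none
      if i = -1 then false
      else PySem.Str.startswith s "/" ||
           (decide (k > 0) && pvHeadUpper s && PySem.Str.endswith (PySem.List.pyGetD sents (k - 1) "") " v.")

-- Pre_ = exactly the inputs on which A returns: all sentences are found (no RuntimeError) and
-- the first located sentence is not a merge-sentence (no IndexError from spans[-1] on []).
def Pre_get_spans_from_sents (text : String) (sents : List String) : Prop :=
  pvAllFind text sents (PySem.List.enumerate sents) 0 = true ∧
  pvFirstMerge text sents (PySem.List.enumerate sents) 0 = false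
instance (text : String) (sents : List String) : Decidable (Pre_get_spans_from_sents text sents) := by
  unfold Pre_get_spans_from_sents; infer_instance

def pvWitness_get_spans_from_sents : String × List String := ("Ab cd", ["Ab", "cd"])

def Spec_get_spans_from_sents (text : String) (sents : List String) (out : List (List Int)) : Prop := out = get_spans_from_sents_alt text sents
instance (text : String) (sents : List String) (out : List (List Int)) : Decidable (Spec_get_spans_from_sents text sents out) := by unfold Spec_get_spans_from_sents; infer_instance

-- ===== CLAIM (what is proved, stated in full; the proofs are below) =====
def Claim_equal_get_spans_from_sents : Prop := ∀ (text : String) (sents : List String), Dom_get_spans_from_sents text sents → Pre_get_spans_from_sents text sents → Spec_get_spans_from_sents text sents (get_spans_from_sents text sents)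

-- ===== LEMMAS AND PROOFS =====
-- the merge/append step A performs per located sentence
def pvStep (spans : List (List Int)) (r : Int × Int × Bool) : List (List Int) :=
  if r.2.2 then pvSetLastEnd spans r.2.1 else spans ++ [[r.1, r.2.1]]

lemma pvSetLastEnd_ne_nil (spans : List (List Int)) (e : Int) (h : spans ≠ []) :
    pvSetLastEnd spans e ≠ [] := by
  unfold pvSetLastEnd
  cases hg : spans.getLast? with
  | none => exact h
  | some sp => simp

lemma pvStep_ne_nil (spans : List (List Int)) (r : Int × Int × Bool) (h : spans ≠ []) :
    pvStep spans r ≠ [] := by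
  unfold pvStep
  split
  · exact pvSetLastEnd_ne_nil spans r.2.1 h
  · simp

lemma pvSetLastEnd_cons (sp : List Int) (spans : List (List Int)) (e : Int) (h : spans ≠ []) :
    pvSetLastEnd (sp :: spans) e = sp :: pvSetLastEnd spans e := by
  obtain ⟨x, xs, rfl⟩ := List.exists_cons_of_ne_nil h
  unfold pvSetLastEnd
  cases hg : (x :: xs).getLast? with
  | none => simp at hg
  | some q => simp [List.getLast?_cons_cons, hg]

lemma pvStep_cons (sp : List Int) (spans : List (List Int)) (r : Int × Int × Bool) (h : spans ≠ []) :
    pvStep (sp :: spans) r = sp :: pvStep spans r := by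
  unfold pvStep
  split
  · exact pvSetLastEnd_cons sp spans r.2.1 h
  · simp

lemma foldl_pvStep_cons (recs : List (Int × Int × Bool)) (sp : List Int)
    (spans : List (List Int)) (h : spans ≠ []) :
    List.foldl pvStep (sp :: spans) recs = sp :: List.foldl pvStep spans recs := by
  induction recs generalizing spans with
  | nil => rfl
  | cons r rest ih =>
      simp only [List.foldl_cons]
      rw [pvStep_cons sp spans r h]
      exact ih (pvStep spans r) (pvStep_ne_nil spans r h)

lemma pvB_run_eq_foldl (recs : List (Int × Int × Bool)) (s e : Int) :
    pvB_run s e recs = List.foldl pvStep [[s, e]] recs := by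
  induction recs generalizing s e with
  | nil => rfl
  | cons r rest ih =>
      obtain ⟨i2, e2, m⟩ := r
      cases m with
      | true =>
          have hset : pvStep [[s, e]] (i2, e2, true) = [[s, e2]] := by
            simp [pvStep, pvSetLastEnd, PySem.List.pySetD_of_nonneg _ _ (by norm_num : (0:Int) ≤ 1)]
          simp only [pvB_run, List.foldl_cons, hset]
          simpa using ih s e2
      | false =>
          have hset : pvStep [[s, e]] (i2, e2, false) = [[s, e], [i2, e2]] := by simp [pvStep]
          simp only [pvB_run, List.foldl_cons, hset]
          rw [foldl_pvStep_cons rest [s, e] [[i2, e2]] (by simp)]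
          simpa using ih i2 e2

lemma pvB_pass1_acc (text : String) (sents : List String)
    (pairs : List (Int × String)) (curr : Int) (acc : List (Int × Int × Bool)) :
    pvB_pass1 text sents pairs curr acc = acc ++ pvB_pass1 text sents pairs curr [] := by
  induction pairs generalizing curr acc with
  | nil => simp [pvB_pass1]
  | cons p rest ih =>
      obtain ⟨k, raw⟩ := p
      simp only [pvB_pass1]
      split
      · exact ih curr acc
      · split
        · simp
        · rw [ih _ (acc ++ _), ih _ ([] ++ _)]
          simp

lemma pvA_go_eq_foldl (text : String) (sents : List String)
    (pairs : List (Int × String)) (spans : List (List Int)) (curr : Int) :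
    pvA_go text sents pairs spans curr =
      List.foldl pvStep spans (pvB_pass1 text sents pairs curr []) := by
  induction pairs generalizing spans curr with
  | nil => rfl
  | cons p rest ih =>
      obtain ⟨k, raw⟩ := p
      simp only [pvA_go, pvB_pass1]
      split
      · exact ih spans curr
      · split
        · rfl
        · rw [pvB_pass1_acc]
          simp only [List.nil_append, List.singleton_append, List.foldl_cons]
          set s := PySem.Str.strip raw
          set i := PySem.Str.findFrom text s curr none
          set e := i + PySem.Str.len s
          cases h1 : PySem.Str.startswith s "/" with
          | true =>
              rw [if_pos rfl, ih]
              rfl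
          | false =>
              cases h2 : (decide (k > 0) && pvHeadUpper s &&
                  PySem.Str.endswith (PySem.List.pyGetD sents (k - 1) "") " v.") with
              | true =>
                  rw [if_neg (by simp), if_pos rfl, ih]
                  rfl
              | false =>
                  rw [if_neg (by simp), if_neg (by simp), ih]
                  rfl

lemma pvFirstMerge_head (text : String) (sents : List String)
    (pairs : List (Int × String)) (curr : Int)
    (h : pvFirstMerge text sents pairs curr = false)
    (r : Int × Int × Bool) (rest' : List (Int × Int × Bool))
    (hr : pvB_pass1 text sents pairs curr [] = r :: rest') : r.2.2 = false := by
  induction pairs generalizing curr with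
  | nil => simp [pvB_pass1] at hr
  | cons p rest ih =>
      obtain ⟨k, raw⟩ := p
      simp only [pvB_pass1] at hr
      simp only [pvFirstMerge] at h
      split at hr
      · rename_i hs
        rw [if_pos hs] at h
        exact ih curr h hr
      · rename_i hs
        rw [if_neg hs] at h
        split at hr
        · simp at hr
        · rename_i hi
          rw [if_neg hi] at h
          rw [pvB_pass1_acc] at hr
          simp only [List.nil_append, List.cons_append, List.cons.injEq] at hr
          rw [← hr.1]
          exact h

-- ===== VERDICT (by name: the statement is the Claim_ definition above) =====
theorem get_spans_from_sents_spec : Claim_equal_get_spans_from_sents := by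
  intro text sents _ hpre
  unfold Spec_get_spans_from_sents
  unfold get_spans_from_sents get_spans_from_sents_alt
  rw [pvA_go_eq_foldl]
  cases hr : pvB_pass1 text sents (PySem.List.enumerate sents) 0 [] with
  | nil => rfl
  | cons r rest' =>
      obtain ⟨i, e, m⟩ := r
      have hm : m = false :=
        pvFirstMerge_head text sents (PySem.List.enumerate sents) 0 hpre.2 (i, e, m) rest' hr
      subst hm
      simp only [pvB_pass2, List.foldl_cons]
      have : pvStep [] (i, e, false) = [[i, e]] := by simp [pvStep]
      rw [this, pvB_run_eq_foldl]
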